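-- pv_equiv track=rewrite | github.com/choinara0/Algorithm | Baekjoon/Graph Algorithm/12852번 - 1로 만들기 2/12852번 - 1로 만들기 2.py | bfs
-- ===== SOURCE A (Python) =====
-- from collections import deque
--
-- def bfs(n):
--     q = deque()
--     q.append([n])
--
--     while q:
--         arr = q.popleft()
--         x = arr[-1]
--         if x == 1:
--             answer = arr
--             return answer
--         if x%3 == 0:
--             q.append(arr + [x//3])
--         if x%2 == 0:
--             q.append(arr + [x//2])
--         q.append(arr + [x-1])
--
--     return
-- ===== SOURCE B (Python) =====
-- def bfs(n):
--     # dist[x] = minimal number of ops to bring x down to 1, built bottom-up;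
--     # then greedy path reconstruction, preferring //3, then //2, then -1
--     # (the order A enqueues children in).
--     dist = [0, 0]
--     for x in range(2, n + 1):
--         best = dist[x - 1]
--         if x % 2 == 0 and dist[x // 2] < best:
--             best = dist[x // 2]
--         if x % 3 == 0 and dist[x // 3] < best:
--             best = dist[x // 3]
--         dist.append(best + 1)
--     path = [n]
--     x = n
--     while x != 1:
--         if x % 3 == 0 and dist[x // 3] == dist[x] - 1:
--             x = x // 3
--         elif x % 2 == 0 and dist[x // 2] == dist[x] - 1:
--             x = x // 2
--         else:
--             x = x - 1
--         path.append(x)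
--     return path
-- ===== Notes on version B (the rewrite author's own statement) =====
-- stated objective: alternative
-- what changed: A runs a breadth-first search over whole paths (a queue of growing lists, no visited set) and returns the first path that reaches 1; B instead computes a dist[] table of minimal step counts bottom-up and greedily reconstructs the path, preferring //3 then //2 then -1 exactly like A's enqueue order.
import Mathlib
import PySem

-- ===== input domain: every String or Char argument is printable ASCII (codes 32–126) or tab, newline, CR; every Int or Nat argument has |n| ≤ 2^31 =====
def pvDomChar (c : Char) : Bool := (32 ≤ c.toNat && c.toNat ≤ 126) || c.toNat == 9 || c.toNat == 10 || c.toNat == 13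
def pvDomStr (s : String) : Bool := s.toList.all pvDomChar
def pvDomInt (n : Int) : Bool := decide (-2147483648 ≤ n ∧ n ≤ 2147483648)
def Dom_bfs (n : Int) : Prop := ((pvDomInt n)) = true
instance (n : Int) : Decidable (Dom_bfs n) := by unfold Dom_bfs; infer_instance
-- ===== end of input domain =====

-- B replaces A's breadth-first search over whole paths (queue of lists, no visited set) by a
-- dist[] table of minimal step counts built bottom-up plus a greedy path reconstruction that
-- prefers //3, then //2, then -1 — exactly A's enqueue order (same return value on all n ≥ 1).

-- ===== PORT A =====
-- children enqueued for a dequeued path `arr` whose last element is `x` (append order //3, //2, -1)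
def bfsKids (arr : List Int) (x : Int) : List (List Int) :=
  (if x % 3 == 0 then [arr ++ [PySem.Int.floordiv x 3]] else []) ++
  (if x % 2 == 0 then [arr ++ [PySem.Int.floordiv x 2]] else []) ++
  [arr ++ [x - 1]]

-- the `while q:` loop; the fuel only makes it total (the Python loop never ends for n ≤ 0,
-- excluded by Pre_). `none` = the loop ended without `return` (Python returns None) / fuel ran out.
def bfsLoop : Nat → List (List Int) → Option (List Int)
  | 0, _ => none
  | _ + 1, [] => none
  | fuel + 1, arr :: rest =>
    let x := (PySem.List.pyGet? arr (-1)).getD 0   -- arr[-1]; arr is never empty here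
    if x == 1 then some arr
    else bfsLoop fuel (rest ++ bfsKids arr x)

def bfs (n : Int) : List Int := (bfsLoop (4 ^ (n.toNat + 2)) [[n]]).getD []

-- ===== PORT B =====
-- one step of the dist-table loop: dist.append(best + 1); x ≥ 2 throughout, so Int `/`,`%`
-- agree with Python's `//`,`%`
def bAltStep (dist : Array Int) (x : Int) : Array Int :=
  let b0 := dist.getD (x - 1).toNat 0
  let b1 := if x % 2 = 0 ∧ dist.getD (x / 2).toNat 0 < b0 then dist.getD (x / 2).toNat 0 else b0
  let b2 := if x % 3 = 0 ∧ dist.getD (x / 3).toNat 0 < b1 then dist.getD (x / 3).toNat 0 else b1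
  dist.push (b2 + 1)

def bAltTable (n : Int) : Array Int :=
  (PySem.List.pyRange 2 (n + 1) 1).foldl bAltStep #[0, 0]

-- the reconstruction `while x != 1` loop, building the tail of the path; the loop variable is
-- kept as a Nat (x stays ≥ 1 for n ≥ 1, and x//3, x//2, x-1 on positive x are the Nat operations)
def bAltPath (dist : Array Int) (x : Nat) : List Int :=
  if x ≤ 1 then []
  else
    let nxt := if x % 3 = 0 ∧ dist.getD (x / 3) 0 = dist.getD x 0 - 1 then x / 3
               else if x % 2 = 0 ∧ dist.getD (x / 2) 0 = dist.getD x 0 - 1 then x / 2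
               else x - 1
    (nxt : Int) :: bAltPath dist nxt
  termination_by x
  decreasing_by
    split_ifs <;> omega

def bfs_alt (n : Int) : List Int := n :: bAltPath (bAltTable n) n.toNat

-- ===== PRECONDITION & SPEC =====
-- Pre_ excludes exactly n ≤ 0, where A's loop never terminates (no value is returned).
def Pre_bfs (n : Int) : Prop := 1 ≤ n
instance (n : Int) : Decidable (Pre_bfs n) := by unfold Pre_bfs; infer_instance
def pvWitness_bfs : Int := (10)

def Spec_bfs (n : Int) (out : List Int) : Prop := out = bfs_alt n
instance (n : Int) (out : List Int) : Decidable (Spec_bfs n out) := by unfold Spec_bfs; infer_instance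

-- ===== CLAIM (what is proved, stated in full; the proofs are below) =====
def Claim_equal_bfs : Prop := ∀ (n : Int), Dom_bfs n → Pre_bfs n → Spec_bfs n (bfs n)

-- ===== LEMMAS AND PROOFS =====

-- minimal number of operations (//3 when divisible, //2 when divisible, -1) to reach 1
def dN (x : Nat) : Nat :=
  if x ≤ 1 then 0
  else (if x % 3 = 0 then
          min (if x % 2 = 0 then min (dN (x - 1)) (dN (x / 2)) else dN (x - 1)) (dN (x / 3))
        else if x % 2 = 0 then min (dN (x - 1)) (dN (x / 2)) else dN (x - 1)) + 1
  termination_by x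
  decreasing_by all_goals omega

-- greedy next step: the first move (in A's enqueue order //3, //2, -1) that decreases dN
def nxtN (x : Nat) : Nat :=
  if x % 3 = 0 ∧ dN (x / 3) + 1 = dN x then x / 3
  else if x % 2 = 0 ∧ dN (x / 2) + 1 = dN x then x / 2
  else x - 1

lemma nxtN_lt (x : Nat) (h : 2 ≤ x) : nxtN x < x := by
  unfold nxtN; split_ifs <;> omega

-- the greedy (lexicographically first shortest) tail of the path from x down to 1
def gpath (x : Nat) : List Int :=
  if x ≤ 1 then [] else (nxtN x : Int) :: gpath (nxtN x)
  termination_by x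
  decreasing_by exact nxtN_lt x (by omega)

def lastVal (p : List Int) : Int := p.getLast?.getD 0
def fkey (p : List Int) : Nat := p.length + dN (lastVal p).toNat

-- the queue entry whose greedy completion the BFS returns: the first entry of minimal
-- fkey = length + dN(last), preferring the longer (acc) generation over the shorter (es)
def pickW (L : Nat) (es acc : List (List Int)) : List Int :=
  ((acc.find? (fun p => fkey p == L)).or (es.find? (fun p => fkey p == L))).getD []

lemma dN_eq (x : Nat) (h : 2 ≤ x) :
    dN x = (if x % 3 = 0 then
              min (if x % 2 = 0 then min (dN (x - 1)) (dN (x / 2)) else dN (x - 1)) (dN (x / 3))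
            else if x % 2 = 0 then min (dN (x - 1)) (dN (x / 2)) else dN (x - 1)) + 1 := by
  rw [dN, if_neg (by omega : ¬ x ≤ 1)]

lemma dN_pos (x : Nat) (h : 2 ≤ x) : 1 ≤ dN x := by rw [dN_eq x h]; omega
lemma dN_one : dN 1 = 0 := by rw [dN]; simp
lemma dN_le_sub_one (x : Nat) (h : 2 ≤ x) : dN x ≤ dN (x - 1) + 1 := by
  rw [dN_eq x h]; split_ifs <;> omega
lemma dN_le_half (x : Nat) (h : 2 ≤ x) (h2 : x % 2 = 0) : dN x ≤ dN (x / 2) + 1 := by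
  rw [dN_eq x h]; split_ifs <;> omega
lemma dN_le_third (x : Nat) (h : 2 ≤ x) (h3 : x % 3 = 0) : dN x ≤ dN (x / 3) + 1 := by
  rw [dN_eq x h]; split_ifs <;> omega
lemma dN_le_self (x : Nat) : dN x ≤ x := by
  induction x using Nat.strong_induction_on with
  | _ x ih =>
    by_cases h : x ≤ 1
    · rw [dN, if_pos h]; omega
    · have h2 : 2 ≤ x := by omega
      have := dN_le_sub_one x h2
      have := ih (x - 1) (by omega)
      omega
lemma nxtN_pos (x : Nat) (h : 2 ≤ x) : 1 ≤ nxtN x := by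
  unfold nxtN; split_ifs <;> omega
lemma nxtN_dist (x : Nat) (h : 2 ≤ x) : dN (nxtN x) + 1 = dN x := by
  unfold nxtN
  split_ifs with h1 h2
  · exact h1.2
  · exact h2.2
  · have hd := dN_eq x h
    split_ifs at hd <;> omega
lemma dN_zero : dN 0 = 0 := by rw [dN]; simp

lemma gpath_one : gpath 1 = [] := by rw [gpath]; simp
lemma gpath_of_ge_two (x : Nat) (h : 2 ≤ x) :
    gpath x = (nxtN x : Int) :: gpath (nxtN x) := by rw [gpath]; simp [Nat.not_le.mpr (by omega : 1 < x)]

lemma lastVal_concat (p : List Int) (v : Int) : lastVal (p ++ [v]) = v := by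
  simp [lastVal]

lemma fkey_concat (p : List Int) (v : Int) :
    fkey (p ++ [v]) = p.length + 1 + dN v.toNat := by
  simp [fkey, lastVal_concat]

lemma fkey_ge_length (p : List Int) : p.length ≤ fkey p := by
  unfold fkey; omega

-- Nat-indexed form of the enqueued children (x = ↑m, m ≥ 1)
def kidsN (e : List Int) (m : Nat) : List (List Int) :=
  (if m % 3 = 0 then [e ++ [((m / 3 : Nat) : Int)]] else []) ++
  (if m % 2 = 0 then [e ++ [((m / 2 : Nat) : Int)]] else []) ++
  [e ++ [((m - 1 : Nat) : Int)]]

lemma bfsKids_natCast (e : List Int) (m : Nat) (hm : 1 ≤ m) :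
    bfsKids e (m : Int) = kidsN e m := by
  unfold bfsKids kidsN
  have m1 : (m : Int) - 1 = ((m - 1 : Nat) : Int) := by omega
  by_cases h3 : m % 3 = 0 <;> by_cases h2 : m % 2 = 0 <;>
    simp [h3, h2, m1,
      (by omega : ((m : Int) % 3 = 0) ↔ m % 3 = 0),
      (by omega : ((m : Int) % 2 = 0) ↔ m % 2 = 0)]

lemma mem_kidsN (e p : List Int) (m : Nat) (hm : 2 ≤ m) (hp : p ∈ kidsN e m) :
    ∃ v : Nat, p = e ++ [(v : Int)] ∧ 1 ≤ v ∧ dN m ≤ dN v + 1 := by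
  unfold kidsN at hp
  simp only [List.mem_append, List.mem_singleton] at hp
  rcases hp with (hp | hp) | hp
  · by_cases h3 : m % 3 = 0
    · rw [if_pos h3] at hp; simp at hp
      exact ⟨m / 3, hp, by omega, dN_le_third m hm h3⟩
    · rw [if_neg h3] at hp; simp at hp
  · by_cases h2 : m % 2 = 0
    · rw [if_pos h2] at hp; simp at hp
      exact ⟨m / 2, hp, by omega, dN_le_half m hm h2⟩
    · rw [if_neg h2] at hp; simp at hp
  · exact ⟨m - 1, hp, by omega, by have := dN_le_sub_one m hm; omega⟩

lemma kidsN_length_le (e : List Int) (m : Nat) : (kidsN e m).length ≤ 3 := by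
  unfold kidsN; split_ifs <;> simp

lemma kidsN_find?_some (e : List Int) (m L : Nat) (hm : 2 ≤ m) (hL : e.length + dN m = L) :
    (kidsN e m).find? (fun p => fkey p == L) = some (e ++ [(nxtN m : Int)]) := by
  have hd := dN_pos m hm
  unfold kidsN nxtN
  by_cases c3 : m % 3 = 0 ∧ dN (m / 3) + 1 = dN m
  · rw [if_pos c3, if_pos c3.1]
    simp only [List.cons_append, List.nil_append]
    rw [List.find?_cons_of_pos (by simp only [fkey_concat, Int.toNat_natCast, beq_iff_eq]; omega)]
  · rw [if_neg c3]
    by_cases c2 : m % 2 = 0 ∧ dN (m / 2) + 1 = dN m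
    · rw [if_pos c2, if_pos c2.1]
      by_cases h3 : m % 3 = 0
      · rw [if_pos h3]
        simp only [List.cons_append, List.nil_append]
        rw [List.find?_cons_of_neg (by simp only [fkey_concat, Int.toNat_natCast, Bool.not_eq_true, beq_eq_false_iff_ne, ne_eq]; omega), List.find?_cons_of_pos (by simp only [fkey_concat, Int.toNat_natCast, beq_iff_eq]; omega)]
      · rw [if_neg h3]
        simp only [List.cons_append, List.nil_append]
        rw [List.find?_cons_of_pos (by simp only [fkey_concat, Int.toNat_natCast, beq_iff_eq]; omega)]
    · rw [if_neg c2]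
      have hlast : dN (m - 1) + 1 = dN m := by
        have h := nxtN_dist m hm
        unfold nxtN at h
        rw [if_neg c3, if_neg c2] at h
        exact h
      by_cases h3 : m % 3 = 0 <;> by_cases h2 : m % 2 = 0
      · rw [if_pos h3, if_pos h2]
        simp only [List.cons_append, List.nil_append]
        rw [List.find?_cons_of_neg (by simp only [fkey_concat, Int.toNat_natCast, Bool.not_eq_true, beq_eq_false_iff_ne, ne_eq]; omega), List.find?_cons_of_neg (by simp only [fkey_concat, Int.toNat_natCast, Bool.not_eq_true, beq_eq_false_iff_ne, ne_eq]; omega),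
            List.find?_cons_of_pos (by simp only [fkey_concat, Int.toNat_natCast, beq_iff_eq]; omega)]
      · rw [if_pos h3, if_neg h2]
        simp only [List.cons_append, List.nil_append]
        rw [List.find?_cons_of_neg (by simp only [fkey_concat, Int.toNat_natCast, Bool.not_eq_true, beq_eq_false_iff_ne, ne_eq]; omega), List.find?_cons_of_pos (by simp only [fkey_concat, Int.toNat_natCast, beq_iff_eq]; omega)]
      · rw [if_neg h3, if_pos h2]
        simp only [List.cons_append, List.nil_append]
        rw [List.find?_cons_of_neg (by simp only [fkey_concat, Int.toNat_natCast, Bool.not_eq_true, beq_eq_false_iff_ne, ne_eq]; omega), List.find?_cons_of_pos (by simp only [fkey_concat, Int.toNat_natCast, beq_iff_eq]; omega)]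
      · rw [if_neg h3, if_neg h2]
        simp only [List.nil_append]
        rw [List.find?_cons_of_pos (by simp only [fkey_concat, Int.toNat_natCast, beq_iff_eq]; omega)]

lemma nxtN_mem_kidsN (e : List Int) (m : Nat) :
    e ++ [(nxtN m : Int)] ∈ kidsN e m := by
  unfold kidsN nxtN
  by_cases c3 : m % 3 = 0 ∧ dN (m / 3) + 1 = dN m
  · rw [if_pos c3, if_pos c3.1]; simp
  · rw [if_neg c3]
    by_cases c2 : m % 2 = 0 ∧ dN (m / 2) + 1 = dN m
    · rw [if_pos c2, if_pos c2.1]; simp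
    · rw [if_neg c2]; simp

lemma kidsN_find?_none (e : List Int) (m L : Nat) (hm : 2 ≤ m)
    (hgt : L < e.length + dN m) :
    (kidsN e m).find? (fun p => fkey p == L) = none := by
  rw [List.find?_eq_none]
  intro p hp
  obtain ⟨v, rfl, hv1, hvd⟩ := mem_kidsN e p m hm hp
  simp [fkey_concat]
  omega

-- the BFS invariant: `es` is the rest of the current generation (length ℓ), `acc` the next
-- generation (length ℓ+1); every entry has fkey ≥ L and some entry attains L; then the loop
-- returns the greedy completion of the preferred L-entry.
lemma bfs_main : ∀ (k ℓ L : Nat), ℓ + k = L + 1 →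
    ∀ (es acc : List (List Int)) (fuel : Nat),
    (∀ p ∈ es, p ≠ [] ∧ 1 ≤ lastVal p ∧ p.length = ℓ) →
    (∀ p ∈ acc, p ≠ [] ∧ 1 ≤ lastVal p ∧ p.length = ℓ + 1) →
    (∀ p ∈ es ++ acc, L ≤ fkey p) →
    (∃ p ∈ es ++ acc, fkey p = L) →
    es.length * 4 ^ (L + 1 - ℓ) + acc.length * 4 ^ (L - ℓ) ≤ fuel →
    bfsLoop fuel (es ++ acc) =
      some (pickW L es acc ++ gpath (lastVal (pickW L es acc)).toNat) := by
  intro k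
  induction k with
  | zero =>
    intro ℓ L hk es acc fuel h1 h2 h3 h4 hfuel
    exfalso
    obtain ⟨p, hp, hfp⟩ := h4
    rcases List.mem_append.mp hp with hpe | hpa
    · have hl := (h1 p hpe).2.2
      have := fkey_ge_length p
      omega
    · have hl := (h2 p hpa).2.2
      have := fkey_ge_length p
      omega
  | succ k ihk =>
    intro ℓ L hk es acc fuel
    induction es generalizing acc fuel with
    | nil =>
      intro h1 h2 h3 h4 hfuel
      have hres := ihk (ℓ + 1) L (by omega) acc [] fuel h2 (by simp)
        (by simpa using h3) (by simpa using h4)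
        (by simpa [show L + 1 - (ℓ + 1) = L - ℓ by omega] using hfuel)
      rw [List.append_nil] at hres
      simp only [List.nil_append]
      rw [hres]
      unfold pickW
      simp
    | cons e rest ihes =>
      intro h1 h2 h3 h4 hfuel
      obtain ⟨hene, hepos, helen⟩ := h1 e List.mem_cons_self
      have hlL : ℓ ≤ L := by
        obtain ⟨p, hp, hfp⟩ := h4
        rcases List.mem_append.mp hp with hpe | hpa
        · have hl := (h1 p hpe).2.2
          have := fkey_ge_length p
          omega
        · have hl := (h2 p hpa).2.2
          have := fkey_ge_length p
          omega
      have hpow1 : 1 ≤ 4 ^ (L - ℓ) := Nat.one_le_pow _ _ (by norm_num)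
      have hpow : 4 ^ (L + 1 - ℓ) = 4 * 4 ^ (L - ℓ) := by
        rw [show L + 1 - ℓ = (L - ℓ) + 1 by omega, pow_succ]; ring
      obtain ⟨f, rfl⟩ : ∃ f, fuel = f + 1 := by
        refine ⟨fuel - 1, ?_⟩
        simp only [List.length_cons] at hfuel
        have hle : 4 ^ (L + 1 - ℓ) ≤ (rest.length + 1) * 4 ^ (L + 1 - ℓ) :=
          Nat.le_mul_of_pos_left _ (by omega)
        have h41 : 1 ≤ 4 ^ (L + 1 - ℓ) := Nat.one_le_pow _ _ (by norm_num)
        omega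
      have hx : (PySem.List.pyGet? e (-1)).getD 0 = lastVal e := by
        rw [PySem.List.pyGet?_neg_one]; rfl
      rw [List.cons_append, bfsLoop]
      simp only [hx]
      have hfe : fkey e = ℓ + dN (lastVal e).toNat := by
        unfold fkey; omega
      by_cases hone : lastVal e = 1
      · rw [if_pos (by simp [hone])]
        have hfeL : fkey e = ℓ := by rw [hfe, hone]; simp [dN_one]
        have hlL' : L = ℓ := le_antisymm (by have := h3 e (by simp); omega) hlL
        have haccnone : acc.find? (fun p => fkey p == L) = none := by
          rw [List.find?_eq_none]
          intro p hp
          have hl := (h2 p hp).2.2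
          have := fkey_ge_length p
          simp only [beq_iff_eq]
          omega
        have hesfind : (e :: rest).find? (fun p => fkey p == L) = some e :=
          List.find?_cons_of_pos (by simp [hfeL, hlL'])
        unfold pickW
        rw [haccnone, hesfind, Option.none_or, Option.getD_some]
        simp [hone, gpath_one]
      · rw [if_neg (by simp [hone])]
        -- step: enqueue the children of e
        set m : Nat := (lastVal e).toNat with hmdef
        have hm2 : 2 ≤ m := by omega
        have hcast : lastVal e = (m : Int) := by omega
        rw [hcast, bfsKids_natCast e m (by omega)]
        rw [List.append_assoc]
        -- invariant for the new queue
        have h1' : ∀ p ∈ rest, p ≠ [] ∧ 1 ≤ lastVal p ∧ p.length = ℓ :=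
          fun p hp => h1 p (List.mem_cons_of_mem _ hp)
        have h2' : ∀ p ∈ acc ++ kidsN e m, p ≠ [] ∧ 1 ≤ lastVal p ∧ p.length = ℓ + 1 := by
          intro p hp
          rcases List.mem_append.mp hp with hpa | hpk
          · exact h2 p hpa
          · obtain ⟨v, rfl, hv1, hvd⟩ := mem_kidsN e p m hm2 hpk
            refine ⟨by simp, ?_, by simp [helen]⟩
            rw [lastVal_concat]; omega
        have h3' : ∀ p ∈ rest ++ (acc ++ kidsN e m), L ≤ fkey p := by
          intro p hp
          rcases List.mem_append.mp hp with hpr | hp2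
          · exact h3 p (by simp [hpr])
          rcases List.mem_append.mp hp2 with hpa | hpk
          · exact h3 p (by simp [hpa])
          · obtain ⟨v, rfl, hv1, hvd⟩ := mem_kidsN e p m hm2 hpk
            have hfL := h3 e (by simp)
            rw [fkey_concat]
            simp only [Int.toNat_natCast]
            omega
        have h4' : ∃ p ∈ rest ++ (acc ++ kidsN e m), fkey p = L := by
          obtain ⟨p, hp, hfp⟩ := h4
          rcases List.mem_append.mp hp with hpe | hpa
          · rcases List.mem_cons.mp hpe with rfl | hpr
            · refine ⟨p ++ [(nxtN m : Int)], by simp [nxtN_mem_kidsN p m], ?_⟩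
              rw [fkey_concat]
              simp only [Int.toNat_natCast]
              have := nxtN_dist m hm2
              omega
            · exact ⟨p, by simp [hpr], hfp⟩
          · exact ⟨p, by simp [hpa], hfp⟩
        have hfuel' : rest.length * 4 ^ (L + 1 - ℓ) +
            (acc ++ kidsN e m).length * 4 ^ (L - ℓ) ≤ f := by
          have hk3 : (kidsN e m).length ≤ 3 := kidsN_length_le e m
          simp only [List.length_cons, List.length_append] at hfuel ⊢
          have hkk : (kidsN e m).length * 4 ^ (L - ℓ) ≤ 3 * 4 ^ (L - ℓ) :=
            Nat.mul_le_mul_right _ hk3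
          rw [hpow] at hfuel ⊢
          have h1m : (rest.length + 1) * (4 * 4 ^ (L - ℓ))
              = rest.length * (4 * 4 ^ (L - ℓ)) + 4 * 4 ^ (L - ℓ) := by ring
          have h2m : (acc.length + (kidsN e m).length) * 4 ^ (L - ℓ)
              = acc.length * 4 ^ (L - ℓ) + (kidsN e m).length * 4 ^ (L - ℓ) := by ring
          rw [h1m] at hfuel
          rw [h2m]
          omega
        have hres := ihes (acc ++ kidsN e m) f h1' h2' h3' h4' hfuel'
        rw [hres]
        -- compare the two winners
        unfold pickW
        rw [List.find?_append, Option.or_assoc]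
        cases hacc : acc.find? (fun p => fkey p == L) with
        | some a => simp [Option.or]
        | none =>
          simp only [Option.none_or]
          by_cases hfeL : fkey e = L
          · -- e is the current winner; its greedy child takes over
            rw [kidsN_find?_some e m L hm2 (by omega), List.find?_cons_of_pos (by simp [hfeL])]
            simp only [Option.some_or, Option.getD_some]
            rw [lastVal_concat]
            simp only [Int.toNat_natCast]
            rw [gpath_of_ge_two m hm2]
            simp
          · rw [kidsN_find?_none e m L hm2 (by have := h3 e (by simp); omega),
              List.find?_cons_of_neg (by simp [hfeL])]
            simp

lemma bfs_eq_gpath (n : Int) (h : 1 ≤ n) : bfs n = n :: gpath n.toNat := by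
  have hlast : lastVal [n] = n := by simp [lastVal]
  have hfkey : fkey [n] = 1 + dN n.toNat := by simp [fkey, hlast]
  have hmain := bfs_main (1 + dN n.toNat) 1 (1 + dN n.toNat) (by omega) [[n]] [] (4 ^ (n.toNat + 2))
    (by intro p hp; simp at hp; subst hp; exact ⟨by simp, by simp [hlast]; omega, by simp⟩)
    (by simp)
    (by intro p hp; simp at hp; subst hp; omega)
    (⟨[n], by simp, hfkey⟩)
    (by
      have hdm := dN_le_self n.toNat
      have hle : 4 ^ (1 + dN n.toNat + 1 - 1) ≤ 4 ^ (n.toNat + 2) :=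
        Nat.pow_le_pow_right (by norm_num) (by omega)
      simp only [List.length_singleton, List.length_nil, one_mul, Nat.zero_mul, Nat.add_zero]
      exact hle)
  have hpick : pickW (1 + dN n.toNat) [[n]] [] = [n] := by
    unfold pickW
    simp [List.find?, hfkey]
  rw [List.append_nil] at hmain
  rw [hpick, hlast] at hmain
  unfold bfs
  rw [hmain]
  simp

lemma toArray_getD (l : List Int) (i : Nat) (d : Int) : l.toArray.getD i d = l.getD i d := by
  simp [Array.getD, List.getD]
  split_ifs <;> simp_all

lemma bAltTable_spec (m : Nat) (h : 1 ≤ m) :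
    bAltTable (m : Int) = ((List.range (m + 1)).map (fun i => (dN i : Int))).toArray := by
  induction m with
  | zero => omega
  | succ m ih =>
    by_cases hm : m = 0
    · subst hm
      show bAltTable (1 : Int) = _
      rw [bAltTable, PySem.List.pyRange_one_eq_nil (by norm_num)]
      simp [List.range_succ, dN_zero, dN_one]
    · have ih := ih (by omega)
      have hsplit : PySem.List.pyRange 2 (((m + 1 : Nat) : Int) + 1) 1
          = PySem.List.pyRange 2 ((m : Int) + 1) 1 ++ [(m : Int) + 1] := by
        push_cast
        exact PySem.List.pyRange_one_succ_right (by omega)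
      rw [bAltTable, hsplit, List.foldl_append, ← bAltTable, ih]
      have hx : (m : Int) + 1 = ((m + 1 : Nat) : Int) := by push_cast; ring
      simp only [List.foldl_cons, List.foldl_nil, hx]
      unfold bAltStep
      simp only [toArray_getD, List.push_toArray]
      have t1 : (((m + 1 : Nat) : Int) - 1).toNat = m := by omega
      have t2 : (((m + 1 : Nat) : Int) / 2).toNat = (m + 1) / 2 := by omega
      have t3 : (((m + 1 : Nat) : Int) / 3).toNat = (m + 1) / 3 := by omega
      rw [t1, t2, t3]
      simp only [
        PySem.List.getD_map_range _ _ _ _ (by omega : m < m + 1),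
        PySem.List.getD_map_range _ _ _ _ (by omega : (m + 1) / 2 < m + 1),
        PySem.List.getD_map_range _ _ _ _ (by omega : (m + 1) / 3 < m + 1)]
      simp only [List.range_succ, List.map_append, List.map_cons, List.map_nil]
      have hd := dN_eq (m + 1) (by omega)
      simp only [Nat.add_sub_cancel] at hd
      rw [hd]
      congr 1
      simp only [List.append_cancel_left_eq, List.cons.injEq, and_true]
      split_ifs <;> omega

lemma bAltPath_spec (m x : Nat) (h1 : 1 ≤ x) (h2 : x ≤ m) :
    bAltPath ((List.range (m + 1)).map (fun i => (dN i : Int))).toArray x = gpath x := by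
  induction x using Nat.strong_induction_on with
  | _ x ih =>
    by_cases hx : x ≤ 1
    · have hx1 : x = 1 := by omega
      subst hx1
      rw [bAltPath, if_pos (by omega), gpath_one]
    · have hx2 : 2 ≤ x := by omega
      rw [bAltPath, if_neg hx, gpath_of_ge_two x hx2]
      simp only [toArray_getD]
      have g1 : ((List.range (m + 1)).map (fun i => (dN i : Int))).getD (x / 3) 0
          = ((dN (x / 3) : Int)) := PySem.List.getD_map_range _ _ _ _ (by omega)
      have g2 : ((List.range (m + 1)).map (fun i => (dN i : Int))).getD (x / 2) 0
          = ((dN (x / 2) : Int)) := PySem.List.getD_map_range _ _ _ _ (by omega)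
      have g3 : ((List.range (m + 1)).map (fun i => (dN i : Int))).getD x 0
          = ((dN x : Int)) := PySem.List.getD_map_range _ _ _ _ (by omega)
      have hsel : (if x % 3 = 0 ∧ ((List.range (m + 1)).map (fun i => (dN i : Int))).getD (x / 3) 0
            = ((List.range (m + 1)).map (fun i => (dN i : Int))).getD x 0 - 1 then x / 3
          else if x % 2 = 0 ∧ ((List.range (m + 1)).map (fun i => (dN i : Int))).getD (x / 2) 0
            = ((List.range (m + 1)).map (fun i => (dN i : Int))).getD x 0 - 1 then x / 2
          else x - 1) = nxtN x := by
        unfold nxtN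
        simp only [g1, g2, g3]
        split_ifs <;> first | rfl | omega
      simp only [hsel]
      have hnx1 : 1 ≤ nxtN x := nxtN_pos x hx2
      have hnxl : nxtN x < x := nxtN_lt x hx2
      rw [ih (nxtN x) hnxl hnx1 (by omega)]

lemma bfs_alt_eq_gpath (n : Int) (h : 1 ≤ n) : bfs_alt n = n :: gpath n.toNat := by
  lift n to Nat using (by omega : (0:Int) ≤ n) with m
  have hm1 : 1 ≤ m := by exact_mod_cast h
  unfold bfs_alt
  rw [Int.toNat_natCast, bAltTable_spec m hm1, bAltPath_spec m m hm1 le_rfl]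

-- ===== VERDICT (by name: the statement is the Claim_ definition above) =====
theorem bfs_spec : Claim_equal_bfs := by
  intro n _ hpre
  unfold Spec_bfs
  rw [bfs_eq_gpath n hpre, bfs_alt_eq_gpath n hpre]
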